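-- pv_equiv track=rewrite | github.com/qtli/GSM-Plus | scripts/utils/extract_ans.py | is_question_sentence
-- ===== SOURCE A (Python) =====
-- def is_question_sentence(sentence):
--     question_words = ['who', 'what', 'when', 'where', 'why', 'how', 'which', 'whom', 'calculate', 'determine']
--
--     # Check if the sentence ends with a question mark
--     if sentence.endswith('?'):
--         return True
--
--     # Check if any question words are present in the sentence
--     for word in question_words:
--         if word in sentence.lower():
--             return True
--
--     return False
-- ===== SOURCE B (Python) =====
-- def is_question_sentence(sentence):
--     if sentence.endswith('?'):
--         return True
--     question_words = ('who', 'what', 'when', 'where', 'why', 'how', 'which', 'whom', 'calculate', 'determine')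
--     s = sentence.lower()
--     for i in range(len(s)):
--         if any(s.startswith(w, i) for w in question_words):
--             return True
--     return False
-- ===== Notes on version B (the rewrite author's own statement) =====
-- stated objective: alternative
-- what changed: Instead of ten separate full-string substring scans ('word in s' per word), B makes one left-to-right pass over the lowercased sentence, testing at each position whether any question word starts there.
import Mathlib
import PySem

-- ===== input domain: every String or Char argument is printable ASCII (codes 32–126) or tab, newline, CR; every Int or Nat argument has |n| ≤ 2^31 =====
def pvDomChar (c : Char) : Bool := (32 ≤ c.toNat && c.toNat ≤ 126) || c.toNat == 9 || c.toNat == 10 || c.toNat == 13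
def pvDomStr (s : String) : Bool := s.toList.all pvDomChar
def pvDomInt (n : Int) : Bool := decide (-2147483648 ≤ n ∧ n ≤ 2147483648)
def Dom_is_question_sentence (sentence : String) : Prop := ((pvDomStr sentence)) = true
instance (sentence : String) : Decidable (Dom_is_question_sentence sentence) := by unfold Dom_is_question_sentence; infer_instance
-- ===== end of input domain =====

-- B replaces A's ten per-word substring scans with one positional pass over the lowercased
-- sentence, checking at each index whether any question word starts there (alternative, same cost).

-- ===== PORT A =====
def is_question_sentence (sentence : String) : Bool :=
  let question_words : List String :=
    ["who", "what", "when", "where", "why", "how", "which", "whom", "calculate", "determine"]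
  if PySem.Str.endswith sentence "?" then true
  else
    -- 'for word in …: if word in sentence.lower(): return True' / 'return False'
    question_words.any (fun word => PySem.Str.isIn word (PySem.Str.lower sentence))

-- ===== PORT B =====
def is_question_sentence_alt (sentence : String) : Bool :=
  if PySem.Str.endswith sentence "?" then true
  else
    let question_words : List String :=
      ["who", "what", "when", "where", "why", "how", "which", "whom", "calculate", "determine"]
    let s := (PySem.Str.lower sentence).toList
    -- 's.startswith(w, i)' with 0 ≤ i is exactly 'w is a prefix of s[i:]' (ported by hand, exact)
    (List.range s.length).any (fun i =>
      question_words.any (fun w => PySem.Chars.startswith (s.drop i) w.toList))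

-- ===== PRECONDITION & SPEC =====
def Spec_is_question_sentence (sentence : String) (out : Bool) : Prop := out = is_question_sentence_alt sentence
instance (sentence : String) (out : Bool) : Decidable (Spec_is_question_sentence sentence out) := by unfold Spec_is_question_sentence; infer_instance

-- ===== CLAIM (what is proved, stated in full; the proofs are below) =====
def Claim_equal_is_question_sentence : Prop := ∀ (sentence : String), Dom_is_question_sentence sentence → Spec_is_question_sentence sentence (is_question_sentence sentence)

-- ===== LEMMAS AND PROOFS =====

-- the positional scan over all start indices finds a nonempty word iff it is a substring
lemma scan_eq_isIn (w cs : List Char) (hw : w ≠ []) :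
    ((List.range cs.length).any (fun i => PySem.Chars.startswith (cs.drop i) w))
      = PySem.Chars.isIn w cs := by
  rw [Bool.eq_iff_iff]
  rw [← PySem.Chars.exists_prefix_drop_iff_isIn]
  simp only [List.any_eq_true, List.mem_range, PySem.Chars.startswith_iff]
  constructor
  · rintro ⟨i, _, hp⟩; exact ⟨i, hp⟩
  · rintro ⟨j, hp⟩
    by_cases hj : j < cs.length
    · exact ⟨j, hj, hp⟩
    · exfalso
      have : cs.drop j = [] := List.drop_eq_nil_of_le (le_of_not_gt hj)
      rw [this] at hp
      exact hw (List.prefix_nil.mp hp)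

-- the two nested 'any's commute
lemma any_swap {α β : Type} (l₁ : List α) (l₂ : List β) (p : α → β → Bool) :
    l₁.any (fun a => l₂.any (fun b => p a b)) = l₂.any (fun b => l₁.any (fun a => p a b)) := by
  rw [Bool.eq_iff_iff]
  simp only [List.any_eq_true]
  constructor
  · rintro ⟨a, ha, b, hb, h⟩; exact ⟨b, hb, a, ha, h⟩
  · rintro ⟨b, hb, a, ha, h⟩; exact ⟨a, ha, b, hb, h⟩

-- 'any' respects pointwise equality on the list's members
lemma any_congr_mem {α : Type} (l : List α) (p q : α → Bool) (h : ∀ a ∈ l, p a = q a) :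
    l.any p = l.any q := by
  induction l with
  | nil => rfl
  | cons x xs ih =>
    simp only [List.any_cons, h x (List.mem_cons_self), ih (fun a ha => h a (List.mem_cons_of_mem _ ha))]

-- ===== VERDICT (by name: the statement is the Claim_ definition above) =====
theorem is_question_sentence_spec : Claim_equal_is_question_sentence := by
  intro sentence _
  unfold Spec_is_question_sentence is_question_sentence is_question_sentence_alt
  split_ifs with h
  · rfl
  · rw [any_swap]
    apply any_congr_mem
    intro w hw
    rw [scan_eq_isIn w.toList _ (by fin_cases hw <;> decide)]
    simp [PySem.Str.isIn, PySem.Str.lower]
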